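-- pv_equiv track=rewrite | github.com/aop60003/hacky | vibee_hacker/plugins/blackbox/web_cache_deception.py | _is_cache_hit
-- ===== SOURCE A (Python) =====
-- CACHE_HIT_HEADERS = {
--     "x-cache": ["hit"],
--     "cf-cache-status": ["hit"],
--     "x-drupal-cache": ["hit"],
--     "x-varnish-cache": ["hit"],
--     "age": None,  # Any non-zero Age header indicates caching
-- }
--
-- def _is_cache_hit(headers: dict[str, str]) -> bool:
--     for header, values in CACHE_HIT_HEADERS.items():
--         header_val = headers.get(header, "").lower().strip()
--         if not header_val:
--             continue
--         if values is None:
--             # Age header — any non-zero positive integer means cached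
--             try:
--                 if int(header_val) > 0:
--                     return True
--             except ValueError:
--                 pass
--         else:
--             if any(v in header_val for v in values):
--                 return True
--     return False
-- ===== SOURCE B (Python) =====
-- def _is_cache_hit(headers: dict[str, str]) -> bool:
--     # Single pass over the response headers themselves (not over a config table):
--     # each header present decides on its own whether it signals a cache hit.
--     for key, value in headers.items():
--         val = value.lower().strip()
--         if key in ("x-cache", "cf-cache-status", "x-drupal-cache", "x-varnish-cache"):
--             if "hit" in val:
--                 return True
--         elif key == "age":
--             try:
--                 if int(val) > 0:
--                     return True
--             except ValueError:
--                 pass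
--     return False
-- ===== Notes on version B (the rewrite author's own statement) =====
-- stated objective: alternative
-- what changed: Inverted the traversal: instead of A's pass over the CACHE_HIT_HEADERS config table doing a dict lookup per known header, B makes one pass over the input headers themselves, classifying each present header (named-cache substring test or Age integer test); correct because the boolean is a disjunction over the five relevant headers and dict keys are unique, so traversal order does not matter.
import Mathlib
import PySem

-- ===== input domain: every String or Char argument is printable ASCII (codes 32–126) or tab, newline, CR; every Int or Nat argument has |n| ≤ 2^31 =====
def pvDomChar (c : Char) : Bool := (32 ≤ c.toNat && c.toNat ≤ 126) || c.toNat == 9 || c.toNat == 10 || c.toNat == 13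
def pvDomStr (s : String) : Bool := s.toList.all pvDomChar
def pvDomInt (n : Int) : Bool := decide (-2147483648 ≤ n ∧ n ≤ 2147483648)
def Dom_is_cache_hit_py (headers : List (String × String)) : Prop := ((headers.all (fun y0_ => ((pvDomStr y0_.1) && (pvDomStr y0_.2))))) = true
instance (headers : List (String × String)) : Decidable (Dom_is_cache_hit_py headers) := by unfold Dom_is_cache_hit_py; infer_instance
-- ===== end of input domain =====

-- B inverts the traversal: one pass over the input headers classifying each present header,
-- instead of A's pass over the CACHE_HIT_HEADERS config table with a dict lookup per entry (alternative).
-- Return-value equivalence; neither program mutates its argument.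


-- ===== PORT A =====
-- the module constant CACHE_HIT_HEADERS, in dict insertion order
def pvCacheHitHeaders : List (String × Option (List String)) :=
  [("x-cache", some ["hit"]), ("cf-cache-status", some ["hit"]),
   ("x-drupal-cache", some ["hit"]), ("x-varnish-cache", some ["hit"]),
   ("age", none)]

-- the 'for header, values in CACHE_HIT_HEADERS.items()' loop of A
def pvALoop (headers : List (String × String)) : List (String × Option (List String)) → Bool
  | [] => false
  | (header, values) :: rest =>
    let header_val := PySem.Str.strip (PySem.Str.lower (PySem.Dict.getD ⟨headers⟩ header ""))
    if header_val = "" then pvALoop headers rest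
    else
      match values with
      | none =>
        match PySem.Int.ofStr? header_val with
        | some n => if n > 0 then true else pvALoop headers rest
        | none => pvALoop headers rest
      | some vs =>
        if vs.any (fun v => PySem.Str.isIn v header_val) then true else pvALoop headers rest

def is_cache_hit_py (headers : List (String × String)) : Bool :=
  pvALoop headers pvCacheHitHeaders

-- ===== PORT B =====
-- the 'for key, value in headers.items()' loop of B: classify each header as it is seen
def pvBLoop : List (String × String) → Bool
  | [] => false
  | (key, value) :: rest =>
    let val := PySem.Str.strip (PySem.Str.lower value)
    if key ∈ ["x-cache", "cf-cache-status", "x-drupal-cache", "x-varnish-cache"] then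
      if PySem.Str.isIn "hit" val then true else pvBLoop rest
    else if key = "age" then
      match PySem.Int.ofStr? val with
      | some n => if n > 0 then true else pvBLoop rest
      | none => pvBLoop rest
    else pvBLoop rest

def is_cache_hit_py_alt (headers : List (String × String)) : Bool :=
  pvBLoop headers

-- ===== PRECONDITION & SPEC =====
-- Pre_ excludes association lists with duplicate keys, which cannot arise from a Python dict:
-- there A's first-match get and B's scan over all entries could disagree (an accidental corner).
def Pre_is_cache_hit_py (headers : List (String × String)) : Prop :=
  (headers.map Prod.fst).Nodup
instance (headers : List (String × String)) : Decidable (Pre_is_cache_hit_py headers) := by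
  unfold Pre_is_cache_hit_py; infer_instance

def pvWitness_is_cache_hit_py : (List (String × String)) := [("x-cache", "HIT from edge"), ("age", "0")]

def Spec_is_cache_hit_py (headers : List (String × String)) (out : Bool) : Prop := out = is_cache_hit_py_alt headers
instance (headers : List (String × String)) (out : Bool) : Decidable (Spec_is_cache_hit_py headers out) := by unfold Spec_is_cache_hit_py; infer_instance

-- ===== CLAIM =====
def Claim_equal_is_cache_hit_py : Prop := ∀ (headers : List (String × String)), Dom_is_cache_hit_py headers → Pre_is_cache_hit_py headers → Spec_is_cache_hit_py headers (is_cache_hit_py headers)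

-- ===== LEMMAS AND PROOFS =====

-- trigger tests for a raw header value
def tHit (s : String) : Bool := PySem.Str.isIn "hit" (PySem.Str.strip (PySem.Str.lower s))
def tAge (s : String) : Bool :=
  match PySem.Int.ofStr? (PySem.Str.strip (PySem.Str.lower s)) with
  | some n => decide (n > 0)
  | none => false

def pvGD (h : List (String × String)) (k : String) : String := PySem.Dict.getD ⟨h⟩ k ""

-- the common normal form: A's if-chain over the five relevant header values
def pvG (h : List (String × String)) : Bool :=
  if tHit (pvGD h "x-cache") then true
  else if tHit (pvGD h "cf-cache-status") then true
  else if tHit (pvGD h "x-drupal-cache") then true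
  else if tHit (pvGD h "x-varnish-cache") then true
  else if tAge (pvGD h "age") then true
  else false

theorem pvALoop_nil (headers : List (String × String)) : pvALoop headers [] = false := rfl

-- A's Age step (empty skip + int parse) equals the plain trigger: int('') is a ValueError.
theorem pvALoop_age (headers : List (String × String)) (h : String) :
    pvALoop headers [(h, none)] = if tAge (pvGD headers h) then true else false := by
  conv_lhs => unfold pvALoop
  unfold tAge pvGD
  by_cases he : PySem.Str.strip (PySem.Str.lower (PySem.Dict.getD ⟨headers⟩ h "")) = ""
  · rw [if_pos he, he]
    have h0 : PySem.Int.ofStr? "" = none := by decide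
    rw [h0, pvALoop_nil]
    simp
  · rw [if_neg he, pvALoop_nil]
    cases hp : PySem.Int.ofStr? (PySem.Str.strip (PySem.Str.lower (PySem.Dict.getD ⟨headers⟩ h ""))) with
    | none => simp
    | some n => by_cases hn : n > 0 <;> simp [hn]

-- A's named-header step (empty skip + any over ["hit"]) equals the plain substring trigger.
theorem pvALoop_hit (headers : List (String × String)) (h : String) (rest : List (String × Option (List String))) :
    pvALoop headers ((h, some ["hit"]) :: rest)
    = if tHit (pvGD headers h) then true else pvALoop headers rest := by
  conv_lhs => unfold pvALoop
  unfold tHit pvGD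
  by_cases he : PySem.Str.strip (PySem.Str.lower (PySem.Dict.getD ⟨headers⟩ h "")) = ""
  · rw [if_pos he, he]
    have h0 : PySem.Str.isIn "hit" "" = false := by decide
    rw [h0]
    simp
  · rw [if_neg he]
    simp only [List.any_cons, List.any_nil, Bool.or_false]

theorem a_eq_g (headers : List (String × String)) : is_cache_hit_py headers = pvG headers := by
  unfold is_cache_hit_py pvCacheHitHeaders pvG
  rw [pvALoop_hit, pvALoop_hit, pvALoop_hit, pvALoop_hit, pvALoop_age]

theorem pvGD_nil (k : String) : pvGD [] k = "" := rfl

theorem pvGD_cons (k v n : String) (t : List (String × String)) :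
    pvGD ((k, v) :: t) n = if k = n then v else pvGD t n := by
  unfold pvGD
  rw [PySem.Dict.getD_eq_get?_getD, PySem.Dict.getD_eq_get?_getD, PySem.Dict.get?_mk_cons]
  by_cases h : k = n
  · simp [h]
  · simp [h]

theorem pvGD_not_mem (h : List (String × String)) (k : String)
    (hk : k ∉ h.map Prod.fst) : pvGD h k = "" := by
  induction h with
  | nil => rfl
  | cons p t ih =>
    obtain ⟨a, b⟩ := p
    simp only [List.map_cons, List.mem_cons] at hk
    push Not at hk
    rw [pvGD_cons, if_neg (fun h => hk.1 h.symm), ih hk.2]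

theorem tHit_empty : tHit "" = false := by decide
theorem tAge_empty : tAge "" = false := by decide

theorem pvBLoop_named (k v : String) (t : List (String × String))
    (hm : k ∈ ["x-cache", "cf-cache-status", "x-drupal-cache", "x-varnish-cache"]) :
    pvBLoop ((k, v) :: t) = if tHit v then true else pvBLoop t := by
  simp only [pvBLoop]
  rw [if_pos hm]
  unfold tHit
  rfl

theorem pvBLoop_age_step (v : String) (t : List (String × String)) :
    pvBLoop (("age", v) :: t)
    = (match PySem.Int.ofStr? (PySem.Str.strip (PySem.Str.lower v)) with
       | some n => if n > 0 then true else pvBLoop t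
       | none => pvBLoop t) := by
  simp only [pvBLoop]
  rw [if_neg (by simp), if_pos trivial]

theorem pvBLoop_other (k v : String) (t : List (String × String))
    (hm : k ∉ ["x-cache", "cf-cache-status", "x-drupal-cache", "x-varnish-cache"])
    (ha : ¬ k = "age") :
    pvBLoop ((k, v) :: t) = pvBLoop t := by
  simp only [pvBLoop]
  rw [if_neg hm, if_neg ha]

theorem b_eq_g (headers : List (String × String))
    (hnd : (headers.map Prod.fst).Nodup) : pvBLoop headers = pvG headers := by
  induction headers with
  | nil => simp [pvBLoop, pvG, pvGD_nil, tHit_empty, tAge_empty]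
  | cons p t ih =>
    obtain ⟨k, v⟩ := p
    simp only [List.map_cons, List.nodup_cons] at hnd
    obtain ⟨hk, hnd'⟩ := hnd
    have iht := ih hnd'
    by_cases h1 : k = "x-cache"
    · subst h1
      have h0 : tHit (pvGD t "x-cache") = false := by rw [pvGD_not_mem t _ hk]; exact tHit_empty
      rw [pvBLoop_named _ _ _ (by simp)]
      cases htv : tHit v
      · simp [pvG, pvGD_cons, iht, h0, htv]
      · simp [pvG, pvGD_cons, htv]
    · by_cases h2 : k = "cf-cache-status"
      · subst h2
        have h0 : tHit (pvGD t "cf-cache-status") = false := by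
          rw [pvGD_not_mem t _ hk]; exact tHit_empty
        rw [pvBLoop_named _ _ _ (by simp)]
        cases htv : tHit v
        · simp [pvG, pvGD_cons, iht, h0, htv]
        · simp [pvG, pvGD_cons, htv]
      · by_cases h3 : k = "x-drupal-cache"
        · subst h3
          have h0 : tHit (pvGD t "x-drupal-cache") = false := by
            rw [pvGD_not_mem t _ hk]; exact tHit_empty
          rw [pvBLoop_named _ _ _ (by simp)]
          cases htv : tHit v
          · simp [pvG, pvGD_cons, iht, h0, htv]
          · simp [pvG, pvGD_cons, htv]
        · by_cases h4 : k = "x-varnish-cache"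
          · subst h4
            have h0 : tHit (pvGD t "x-varnish-cache") = false := by
              rw [pvGD_not_mem t _ hk]; exact tHit_empty
            rw [pvBLoop_named _ _ _ (by simp)]
            cases htv : tHit v
            · simp [pvG, pvGD_cons, iht, h0, htv]
            · simp [pvG, pvGD_cons, htv]
          · by_cases h5 : k = "age"
            · subst h5
              have h0 : tAge (pvGD t "age") = false := by
                rw [pvGD_not_mem t _ hk]; exact tAge_empty
              rw [pvBLoop_age_step]
              cases hp : PySem.Int.ofStr? (PySem.Str.strip (PySem.Str.lower v)) with
              | none =>
                have htv : tAge v = false := by unfold tAge; rw [hp]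
                simp [pvG, pvGD_cons, iht, h0, htv]
              | some n =>
                have htv : tAge v = decide (n > 0) := by unfold tAge; rw [hp]
                by_cases hn : n > 0 <;> simp [pvG, pvGD_cons, iht, h0, htv, hn]
            · rw [pvBLoop_other _ _ _ (by simp [h1, h2, h3, h4]) h5, iht]
              simp [pvG, pvGD_cons, h1, h2, h3, h4, h5]

-- ===== VERDICT =====
theorem is_cache_hit_py_spec : Claim_equal_is_cache_hit_py := by
  intro headers _ hpre
  unfold Spec_is_cache_hit_py is_cache_hit_py_alt
  rw [a_eq_g, b_eq_g headers hpre]
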